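-- pv_equiv track=rewrite | github.com/rib-dan/Random-Codes | nmp2.py | nums
-- ===== SOURCE A (Python) =====
-- def nums(n):
--
--
--     numbers = []
--     suma = 0
--     i=0
--
--     while suma != n:
--         i = i+1
--         suma = sum(numbers)
--
--         if suma < n:
--             numbers.append(i)
--             suma = sum(numbers)
--
--         if suma > n:
--             numbers.remove(numbers[0])
--             suma = sum(numbers)
--         numbers.sort(reverse = True)
--
--     numbers.sort()
--
--     return numbers
-- ===== SOURCE B (Python) =====
-- def nums(n):
--     # Find k = largest count of 1..k whose triangular sum fits in n,
--     # then output 1..k-1 and the single remainder-absorbing last term.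
--     k = 0
--     while (k + 1) * (k + 2) // 2 <= n:
--         k += 1
--     if k == 0:
--         return []
--     return list(range(1, k)) + [n - k * (k + 1) // 2 + k]
-- ===== Notes on version B (the rewrite author's own statement) =====
-- stated objective: faster
-- what changed: Replaces A's simulation loop (re-summing and re-sorting the list every iteration while appending/removing elements) with a closed form: find the largest k with k(k+1)/2 <= n by a simple O(sqrt n) scan and emit [1..k-1] plus one remainder-absorbing last element.
import Mathlib
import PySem

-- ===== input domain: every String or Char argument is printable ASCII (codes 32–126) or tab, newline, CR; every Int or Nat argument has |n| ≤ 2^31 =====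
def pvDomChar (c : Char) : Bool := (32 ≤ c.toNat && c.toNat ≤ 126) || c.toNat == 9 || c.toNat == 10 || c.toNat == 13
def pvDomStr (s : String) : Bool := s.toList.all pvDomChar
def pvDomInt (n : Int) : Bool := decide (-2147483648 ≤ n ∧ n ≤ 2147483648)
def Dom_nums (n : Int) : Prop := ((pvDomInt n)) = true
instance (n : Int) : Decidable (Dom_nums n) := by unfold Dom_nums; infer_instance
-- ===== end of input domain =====

-- B replaces A's simulate-sum-and-sort loop by a closed form (find the largest k with
-- k(k+1)/2 ≤ n, emit [1..k-1] plus one remainder-absorbing last term); measured faster.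

-- ===== PORT A =====
-- A's while loop, totalized with fuel (fuel n.toNat+1 is proved sufficient whenever 0 ≤ n);
-- 'none' = fuel exhaustion or the IndexError of numbers.remove(numbers[0]) on the empty
-- list — both happen only for n < 0, which Pre_nums excludes.
def numsLoop (n : Int) : Nat → List Int → Int → Int → Option (List Int)
  | 0, _, _, _ => none
  | fuel+1, numbers, suma, i =>
    if suma = n then some numbers else
    let i1 := i + 1
    let s1 := numbers.sum
    let numbers1 := if s1 < n then numbers ++ [i1] else numbers
    let s2 := numbers1.sum
    if s2 > n then
      (PySem.List.pyGet? numbers1 0).bind (fun v =>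
        (PySem.List.remove? numbers1 v).bind (fun numbers2 =>
          numsLoop n fuel (PySem.List.sorted numbers2 (fun x => x) true) numbers2.sum i1))
    else
      numsLoop n fuel (PySem.List.sorted numbers1 (fun x => x) true) s2 i1

def nums (n : Int) : List Int :=
  match numsLoop n (n.toNat + 1) [] 0 0 with
  | some numbers => PySem.List.sorted numbers (fun x => x)
  | none => []

-- ===== PORT B =====
-- the 'while (k+1)*(k+2)//2 <= n: k += 1' loop of Source B, fuel-totalized (k never exceeds
-- n, so fuel n.toNat+1 never runs out; on exhaustion the current k is returned)
def findK (n : Int) : Nat → Int → Int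
  | 0, k => k
  | fuel+1, k =>
    if PySem.Int.floordiv ((k+1)*(k+2)) 2 ≤ n then findK n fuel (k+1) else k

-- Source B's two return statements, as a function of the found k
def numsBuild (n k : Int) : List Int :=
  if k = 0 then []
  else PySem.List.pyRange 1 k ++ [n - PySem.Int.floordiv (k*(k+1)) 2 + k]

def nums_alt (n : Int) : List Int :=
  numsBuild n (findK n (n.toNat + 1) 0)

-- ===== PRECONDITION & SPEC =====
-- Pre_ excludes exactly n < 0, where A raises IndexError (numbers.remove(numbers[0]) on the empty list).
def Pre_nums (n : Int) : Prop := 0 ≤ n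
instance (n : Int) : Decidable (Pre_nums n) := by unfold Pre_nums; infer_instance
def pvWitness_nums : Int := (10)

def Spec_nums (n : Int) (out : List Int) : Prop := out = nums_alt n
instance (n : Int) (out : List Int) : Decidable (Spec_nums n out) := by unfold Spec_nums; infer_instance

-- ===== CLAIM (what is proved, stated in full; the proofs are below) =====
def Claim_equal_nums : Prop := ∀ (n : Int), Dom_nums n → Pre_nums n → Spec_nums n (nums n)

-- ===== LEMMAS AND PROOFS =====

-- triangular numbers
def pvTri : Nat → Int
  | 0 => 0
  | j+1 => pvTri j + (j+1)

-- [j, j-1, …, 1]: the loop's list at the head of an iteration in phase 1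
def pvDesc : Nat → List Int
  | 0 => []
  | j+1 => ((j+1 : Nat) : Int) :: pvDesc j

lemma pvTri_succ (j : Nat) : pvTri (j+1) = pvTri j + (j+1) := rfl

lemma pvTri_mono : StrictMono pvTri := by
  apply strictMono_nat_of_lt_succ
  intro j
  rw [pvTri_succ]
  omega

lemma pvTri_two (j : Nat) : pvTri j * 2 = (j:Int) * ((j:Int)+1) := by
  induction j with
  | zero => simp [pvTri]
  | succ m ih =>
    rw [pvTri_succ]
    push_cast
    push_cast at ih
    linarith [ih]

lemma pvFloordivTri (j : Nat) : PySem.Int.floordiv ((j:Int)*((j:Int)+1)) 2 = pvTri j := by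
  rw [PySem.Int.floordiv_eq_iff_of_pos (by norm_num)]
  have h := pvTri_two j
  constructor <;> nlinarith [h]

lemma pvDesc_sum (j : Nat) : (pvDesc j).sum = pvTri j := by
  induction j with
  | zero => simp [pvDesc, pvTri]
  | succ m ih => simp [pvDesc, pvTri_succ, ih]; ring

lemma pvDesc_mem (j : Nat) : ∀ x ∈ pvDesc j, 1 ≤ x ∧ x ≤ (j:Int) := by
  induction j with
  | zero => simp [pvDesc]
  | succ m ih =>
    intro x hx
    simp only [pvDesc, List.mem_cons] at hx
    rcases hx with rfl | hx
    · push_cast; omega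
    · have := ih x hx
      push_cast
      omega

lemma pvDesc_pairwise (j : Nat) : (pvDesc j).Pairwise (fun a b => b < a) := by
  induction j with
  | zero => simp [pvDesc]
  | succ m ih =>
    simp only [pvDesc, List.pairwise_cons]
    refine ⟨fun x hx => ?_, ih⟩
    have := pvDesc_mem m x hx
    push_cast
    omega

lemma pvSortedRev (j : Nat) (i : Int) (h : (j:Int) < i) :
    PySem.List.sorted (pvDesc j ++ [i]) (fun x => x) true = i :: pvDesc j := by
  apply PySem.List.sorted_rev_eq_of_perm_of_pairwise_gt
  · exact (List.perm_append_singleton i (pvDesc j)).symm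
  · simp only [List.pairwise_cons]
    refine ⟨fun x hx => ?_, pvDesc_pairwise j⟩
    have := pvDesc_mem j x hx
    omega

lemma pvDesc_reverse (j : Nat) : (pvDesc j).reverse = PySem.List.pyRange 1 ((j:Int)+1) := by
  induction j with
  | zero => simp [pvDesc, PySem.List.pyRange_one_eq_nil]
  | succ m ih =>
    rw [show pvDesc (m+1) = ((m+1:Nat):Int) :: pvDesc m from rfl, List.reverse_cons, ih,
      show ((m+1:Nat):Int) = (m:Int)+1 by push_cast; ring,
      ← PySem.List.pyRange_one_succ_right (by omega : (1:Int) ≤ (m:Int)+1)]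

lemma pvSortedAsc (j : Nat) (m : Int) (h : (j:Int) < m) :
    PySem.List.sorted (m :: pvDesc j) (fun x => x) = PySem.List.pyRange 1 ((j:Int)+1) ++ [m] := by
  apply PySem.List.sorted_eq_of_perm_of_pairwise_lt
  · rw [← pvDesc_reverse]
    exact (((pvDesc j).reverse_perm.append_right [m]).trans
      (List.perm_append_singleton m (pvDesc j))).symm.symm |>.trans (List.Perm.refl _) |>.symm.symm
  · rw [List.pairwise_append]
    refine ⟨PySem.List.pairwise_lt_pyRange_one 1 ((j:Int)+1), by simp, ?_⟩
    intro x hx y hy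
    simp only [List.mem_singleton] at hy
    subst hy
    rw [PySem.List.mem_pyRange_one] at hx
    omega

-- the B-side loop finds the unique k with Tri k ≤ n < Tri (k+1)
lemma pv_findK (n : Int) : ∀ (f : Nat) (j : Nat), pvTri j ≤ n → (n - pvTri j).toNat + 1 ≤ f →
    ∃ k : Nat, findK n f (j:Int) = (k:Int) ∧ j ≤ k ∧ pvTri k ≤ n ∧ n < pvTri (k+1) := by
  intro f
  induction f with
  | zero => intro j h1 h2 ; omega
  | succ f ih =>
    intro j h1 hf
    rw [show findK n (f+1) (j:Int) =
        (if PySem.Int.floordiv (((j:Int)+1)*((j:Int)+2)) 2 ≤ n then findK n f ((j:Int)+1) else (j:Int)) from rfl]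
    have hdiv : PySem.Int.floordiv (((j:Int)+1)*((j:Int)+2)) 2 = pvTri (j+1) := by
      have h := pvFloordivTri (j+1)
      push_cast at h
      rw [← h]
      congr 1
    rw [hdiv]
    by_cases hle : pvTri (j+1) ≤ n
    · rw [if_pos hle]
      have hmono : pvTri j < pvTri (j+1) := pvTri_mono (by omega)
      have hfuel : (n - pvTri (j+1)).toNat + 1 ≤ f := by omega
      obtain ⟨k, hk1, hk2, hk3, hk4⟩ := ih (j+1) hle hfuel
      refine ⟨k, ?_, by omega, hk3, hk4⟩
      rw [← hk1]
      congr 1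
    · rw [if_neg hle]
      exact ⟨j, rfl, le_refl j, h1, by omega⟩

-- phase 2 of A's loop: list = [i, m, m-1, …, 1], i grows by 1 per iteration until sum = n
lemma pv_phase2 (n : Int) (m : Nat) (hup : n < pvTri (m+2)) :
    ∀ (f : Nat) (i : Int), (m:Int)+2 ≤ i → i ≤ n - pvTri m → (n - (pvTri m + i)).toNat + 1 ≤ f →
    numsLoop n f (i :: pvDesc m) (pvTri m + i) i = some ((n - pvTri m) :: pvDesc m) := by
  intro f
  induction f with
  | zero => intro i h1 h2 hf; omega
  | succ f ih =>
    intro i hi1 hi2 hf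
    by_cases he : pvTri m + i = n
    · have hieq : i = n - pvTri m := by omega
      subst hieq
      simp only [numsLoop, if_pos he]
    · have hlt : pvTri m + i < n := by omega
      simp only [numsLoop, if_neg he]
      have hsum : (i :: pvDesc m).sum = pvTri m + i := by
        simp [pvDesc_sum]; ring
      rw [hsum, if_pos (by omega : pvTri m + i < n)]
      have hsum2 : ((i :: pvDesc m) ++ [i + 1]).sum = pvTri m + i + i + 1 := by
        simp [pvDesc_sum]; ring
      rw [hsum2]
      have hT2 : pvTri (m+2) = pvTri m + ((m:Int)+1) + ((m:Int)+2) := by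
        rw [pvTri_succ, pvTri_succ]; push_cast; ring
      have hover : pvTri m + i + i + 1 > n := by omega
      rw [if_pos hover,
        show (i :: pvDesc m) ++ [i+1] = i :: (pvDesc m ++ [i+1]) from rfl,
        PySem.List.pyGet?_zero_cons, Option.bind_some, PySem.List.remove?_cons_self,
        Option.bind_some]
      have hsum3 : (pvDesc m ++ [i+1]).sum = pvTri m + (i+1) := by
        simp [pvDesc_sum]
      rw [hsum3, pvSortedRev m (i+1) (by omega)]
      have g1 : (m:Int)+2 ≤ i+1 := by omega
      have g2 : i+1 ≤ n - pvTri m := by omega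
      have g3 : (n - (pvTri m + (i+1))).toNat + 1 ≤ f := by omega
      exact ih (i+1) g1 g2 g3

-- phase 1 of A's loop: list = [j, j-1, …, 1] with sum Tri j, j grows until Tri (j+1) > n
lemma pv_phase1 (n : Int) (m : Nat) (hlo : pvTri (m+1) ≤ n) (hup : n < pvTri (m+2)) :
    ∀ (f : Nat) (j : Nat), j ≤ m+1 → (n - pvTri j).toNat + 1 ≤ f →
    numsLoop n f (pvDesc j) (pvTri j) (j:Int) = some ((n - pvTri m) :: pvDesc m) := by
  intro f
  induction f with
  | zero =>
    intro j hj hf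
    have : pvTri j ≤ pvTri (m+1) := pvTri_mono.le_iff_le.mpr hj
    omega
  | succ f ih =>
    intro j hj hf
    by_cases he : pvTri j = n
    · have hjm : j = m+1 := by
        by_contra hne
        have hlt : j < m+1 := by omega
        have : pvTri j < pvTri (m+1) := pvTri_mono hlt
        omega
      subst hjm
      simp only [numsLoop, if_pos he]
      rw [show pvDesc (m+1) = ((m+1:Nat):Int) :: pvDesc m from rfl,
        show n - pvTri m = ((m+1:Nat):Int) by rw [← he, pvTri_succ]; push_cast; ring]
    · have hle : pvTri j ≤ pvTri (m+1) := pvTri_mono.le_iff_le.mpr hj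
      have hjn : pvTri j < n := by omega
      simp only [numsLoop, if_neg he]
      rw [pvDesc_sum, if_pos hjn]
      have hsum1 : (pvDesc j ++ [(j:Int) + 1]).sum = pvTri (j+1) := by
        simp [pvDesc_sum, pvTri_succ]
      rw [hsum1]
      by_cases hnext : pvTri (j+1) > n
      · -- overshoot: this j is m+1
        have hjm : j = m+1 := by
          by_contra hne
          have hlt : j < m+1 := by omega
          have : pvTri (j+1) ≤ pvTri (m+1) := pvTri_mono.le_iff_le.mpr (by omega)
          omega
        subst hjm
        rw [if_pos hnext,
          show pvDesc (m+1) ++ [((m+1:Nat):Int) + 1] =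
            ((m+1:Nat):Int) :: (pvDesc m ++ [((m+1:Nat):Int) + 1]) from rfl,
          PySem.List.pyGet?_zero_cons, Option.bind_some, PySem.List.remove?_cons_self,
          Option.bind_some]
        have hsum2 : (pvDesc m ++ [((m+1:Nat):Int) + 1]).sum = pvTri m + (((m+1:Nat):Int) + 1) := by
          simp [pvDesc_sum]
        rw [hsum2, pvSortedRev m _ (by push_cast; omega)]
        have h1 : pvTri (m+1) = pvTri m + ((m:Int)+1) := by rw [pvTri_succ]
        have hc : ((m+1:Nat):Int) + 1 = ((m:Int)+2) := by push_cast; ring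
        rw [hc]
        have g1 : (m:Int)+2 ≤ (m:Int)+2 := le_refl _
        have g2 : (m:Int)+2 ≤ n - pvTri m := by omega
        have g3 : (n - (pvTri m + ((m:Int)+2))).toNat + 1 ≤ f := by omega
        exact pv_phase2 n m hup f ((m:Int)+2) g1 g2 g3
      · -- no overshoot: continue phase 1 with j+1
        rw [if_neg hnext]
        have hjk : j + 1 ≤ m + 1 := by
          by_contra hne
          have hge : m + 2 ≤ j + 1 := by omega
          have : pvTri (m+2) ≤ pvTri (j+1) := pvTri_mono.le_iff_le.mpr hge
          omega
        have hrw : PySem.List.sorted (pvDesc j ++ [(j:Int) + 1]) (fun x => x) true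
            = pvDesc (j+1) := by
          rw [pvSortedRev j _ (by omega),
            show pvDesc (j+1) = ((j+1:Nat):Int) :: pvDesc j from rfl]
          norm_cast
        rw [hrw]
        have hmono : pvTri j < pvTri (j+1) := pvTri_mono (by omega)
        have hfuel : (n - pvTri (j+1)).toNat + 1 ≤ f := by omega
        have := ih (j+1) hjk hfuel
        rw [← this]
        norm_cast

theorem pv_main (n : Int) (hn : 0 ≤ n) : nums n = nums_alt n := by
  rcases eq_or_lt_of_le hn with h0 | hpos
  · rw [← h0]; decide
  · -- n ≥ 1: get k from the B-side loop spec
    obtain ⟨k, hk1, _, hk3, hk4⟩ := pv_findK n (n.toNat + 1) 0 (by simpa [pvTri] using hn)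
      (by simp [pvTri])
    have hk1' : 1 ≤ k := by
      by_contra h
      have hk0 : k = 0 := by omega
      subst hk0
      simp [pvTri] at hk4
      omega
    obtain ⟨m, rfl⟩ : ∃ m, k = m + 1 := ⟨k - 1, by omega⟩
    -- A's side
    have hA := pv_phase1 n m hk3 hk4 (n.toNat + 1) 0 (by omega) (by simp [pvTri])
    have hAstate : numsLoop n (n.toNat + 1) [] 0 0 = some ((n - pvTri m) :: pvDesc m) := by
      rw [← hA]; rfl
    have htm : pvTri (m+1) = pvTri m + ((m:Int)+1) := by rw [pvTri_succ]
    have hgt : (m:Int) < n - pvTri m := by omega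
    have hAval : nums n = PySem.List.pyRange 1 ((m:Int)+1) ++ [n - pvTri m] := by
      unfold nums
      rw [hAstate]
      exact pvSortedAsc m _ hgt
    -- B's side
    have hk1'' : findK n (n.toNat + 1) 0 = ((m+1:Nat):Int) := by
      rw [← hk1]; norm_num
    have hBval : nums_alt n = PySem.List.pyRange 1 (((m+1:Nat)):Int) ++
        [n - pvTri (m+1) + ((m+1:Nat):Int)] := by
      unfold nums_alt numsBuild
      rw [hk1'', if_neg (by push_cast; omega : ¬ (((m+1:Nat):Int) = 0)),
        show PySem.Int.floordiv (((m+1:Nat):Int)*(((m+1:Nat):Int)+1)) 2 = pvTri (m+1) from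
          pvFloordivTri (m+1)]
    have hval : n - pvTri (m+1) + ((m+1:Nat):Int) = n - pvTri m := by push_cast; omega
    rw [hAval, hBval, hval, show ((m+1:Nat):Int) = (m:Int)+1 by push_cast; ring]

-- ===== VERDICT (by name: the statement is the Claim_ definition above) =====
theorem nums_spec : Claim_equal_nums := by
  intro n _ hpre
  unfold Spec_nums
  exact pv_main n hpre
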